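-- pv_equiv track=rewrite | github.com/buildcleveragent/wms | allapp/inventory/tracking_cleanup.py | _collect_problem_flags
-- ===== SOURCE A (Python) =====
-- def _csv_text(value):
--     return (value or "").strip()
--
-- def _collect_problem_flags(problem_text):
--     flags = {
--         "need_batch_no": False,
--         "need_production_date": False,
--         "need_expiry_date": False,
--     }
--     problems = {part.strip() for part in _csv_text(problem_text).split(",") if part.strip()}
--     if "missing_batch_no" in problems:
--         flags["need_batch_no"] = True
--     if "missing_production_date" in problems:
--         flags["need_production_date"] = True
--     if "missing_expiry_date" in problems:
--         flags["need_expiry_date"] = True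
--     return flags
-- ===== SOURCE B (Python) =====
-- def _collect_problem_flags(problem_text):
--     # streaming character scanner: cut fields at commas on the fly, no split()/set()
--     f1 = f2 = f3 = False
--     cur = []
--     for ch in (problem_text or "").strip() + ",":
--         if ch == ",":
--             field = "".join(cur).strip()
--             if field == "missing_batch_no":
--                 f1 = True
--             elif field == "missing_production_date":
--                 f2 = True
--             elif field == "missing_expiry_date":
--                 f3 = True
--             cur = []
--         else:
--             cur.append(ch)
--     return {
--         "need_batch_no": f1,
--         "need_production_date": f2,
--         "need_expiry_date": f3,
--     }
-- ===== Notes on version B (the rewrite author's own statement) =====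
-- stated objective: alternative
-- what changed: B drops A's split()-into-a-set plus three membership tests entirely and instead runs a single streaming character scanner over the text with an explicit field accumulator, closing and classifying each field when it hits a comma.
import Mathlib
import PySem

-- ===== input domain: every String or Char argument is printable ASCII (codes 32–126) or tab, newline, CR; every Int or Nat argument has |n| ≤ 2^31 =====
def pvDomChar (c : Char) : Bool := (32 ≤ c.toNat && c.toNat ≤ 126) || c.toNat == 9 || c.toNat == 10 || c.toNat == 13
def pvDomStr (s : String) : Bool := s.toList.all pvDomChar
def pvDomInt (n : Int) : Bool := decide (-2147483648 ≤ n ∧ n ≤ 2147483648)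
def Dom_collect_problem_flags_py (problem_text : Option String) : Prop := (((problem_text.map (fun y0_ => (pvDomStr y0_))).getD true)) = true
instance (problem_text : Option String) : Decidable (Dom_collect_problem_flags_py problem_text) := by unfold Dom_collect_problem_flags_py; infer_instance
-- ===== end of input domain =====

-- B replaces A's split-into-set plus three membership tests by a single streaming
-- character scanner that cuts fields at commas on the fly (alternative decomposition).


-- ===== PORT A =====
-- helper _csv_text(value) = (value or "").strip()  (None and "" are both falsy and yield "")
def csv_text_py (value : Option String) : String :=
  PySem.Str.strip (value.getD "")

def collect_problem_flags_py (problem_text : Option String) : List (String × Bool) :=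
  let flags : PySem.Dict String Bool :=
    PySem.Dict.mk [("need_batch_no", false), ("need_production_date", false), ("need_expiry_date", false)]
  let parts := (PySem.Str.split? (csv_text_py problem_text) ",").getD []
  let problems : PySem.Set String :=
    PySem.Set.ofList ((parts.filter (fun p => !(PySem.Str.strip p == ""))).map PySem.Str.strip)
  let flags := if problems.contains "missing_batch_no" then flags.insert "need_batch_no" true else flags
  let flags := if problems.contains "missing_production_date" then flags.insert "need_production_date" true else flags
  let flags := if problems.contains "missing_expiry_date" then flags.insert "need_expiry_date" true else flags
  flags.items

-- ===== PORT B =====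
-- the three field names B compares a closed field against (as char lists)
def pvN1 : List Char := "missing_batch_no".toList
def pvN2 : List Char := "missing_production_date".toList
def pvN3 : List Char := "missing_expiry_date".toList

-- loop body of B's scanner: state = ((f1, f2, f3), cur); a comma closes the current
-- field (strip, compare against the three names, reset cur), any other char is appended.
def pvScanStep (st : (Bool × Bool × Bool) × List Char) (ch : Char) : (Bool × Bool × Bool) × List Char :=
  if ch = ',' then
    let field := PySem.Chars.strip st.2
    (if field = pvN1 then (true, st.1.2.1, st.1.2.2)
     else if field = pvN2 then (st.1.1, true, st.1.2.2)
     else if field = pvN3 then (st.1.1, st.1.2.1, true)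
     else st.1, [])
  else (st.1, st.2 ++ [ch])

def collect_problem_flags_py_alt (problem_text : Option String) : List (String × Bool) :=
  let r := ((PySem.Str.strip (problem_text.getD "")).toList ++ [',']).foldl pvScanStep ((false, false, false), [])
  (PySem.Dict.mk
    [("need_batch_no", r.1.1), ("need_production_date", r.1.2.1), ("need_expiry_date", r.1.2.2)]).items

-- ===== PRECONDITION & SPEC =====
def Spec_collect_problem_flags_py (problem_text : Option String) (out : List (String × Bool)) : Prop := out = collect_problem_flags_py_alt problem_text
instance (problem_text : Option String) (out : List (String × Bool)) : Decidable (Spec_collect_problem_flags_py problem_text out) := by unfold Spec_collect_problem_flags_py; infer_instance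

-- ===== CLAIM (what is proved, stated in full; the proofs are below) =====
def Claim_equal_collect_problem_flags_py : Prop := ∀ (problem_text : Option String), Dom_collect_problem_flags_py problem_text → Spec_collect_problem_flags_py problem_text (collect_problem_flags_py problem_text)

-- ===== LEMMAS AND PROOFS =====

-- comma-splitting with an explicit first-field prefix: the common spec both sides reduce to
def pvFields (pre : List Char) : List Char → List (List Char)
  | [] => [pre]
  | c :: rest => if c = ',' then pre :: pvFields [] rest else pvFields (pre ++ [c]) rest

-- PySem.Chars.splitOn.go on the separator "," computes pvFields
theorem splitOn_go_comma (fuel : Nat) (l cur : List Char) (acc : List (List Char))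
    (h : l.length ≤ fuel) :
    PySem.Chars.splitOn.go [','] fuel l cur acc = acc.reverse ++ pvFields cur.reverse l := by
  induction fuel generalizing l cur acc with
  | zero =>
    have : l = [] := List.length_eq_zero_iff.mp (Nat.le_zero.mp h)
    subst this
    simp [PySem.Chars.splitOn.go, pvFields]
  | succ n ih =>
    cases l with
    | nil => simp [PySem.Chars.splitOn.go, pvFields]
    | cons c rest =>
      simp only [List.length_cons] at h
      by_cases hc : c = ','
      · subst hc
        have hpre : List.isPrefixOf [','] (',' :: rest) = true := by
          simp [List.isPrefixOf]
        rw [PySem.Chars.splitOn.go, if_pos hpre,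
          show List.drop [','].length (',' :: rest) = rest from rfl,
          ih rest [] (cur.reverse :: acc) (by omega)]
        simp [pvFields]
      · have hpre : List.isPrefixOf [','] (c :: rest) = false := by
          simp [List.isPrefixOf]
          intro h'; exact absurd h'.symm hc
        rw [PySem.Chars.splitOn.go, if_neg (by simp [hpre]),
          ih rest (c :: cur) acc (by omega)]
        simp [pvFields, hc]

theorem splitOn_comma (cs : List Char) :
    PySem.Chars.splitOn cs [','] = pvFields [] cs := by
  rw [PySem.Chars.splitOn, splitOn_go_comma (cs.length + 1) cs [] [] (by omega)]
  rfl

-- B's fold over cs ++ [','] = the three flags ORed with a scan of the fields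
theorem foldl_pvScanStep (cs cur : List Char) (f1 f2 f3 : Bool) :
    (cs ++ [',']).foldl pvScanStep ((f1, f2, f3), cur) =
      ((f1 || (pvFields cur cs).any (fun p => PySem.Chars.strip p = pvN1),
        f2 || (pvFields cur cs).any (fun p => PySem.Chars.strip p = pvN2),
        f3 || (pvFields cur cs).any (fun p => PySem.Chars.strip p = pvN3)), []) := by
  induction cs generalizing cur f1 f2 f3 with
  | nil =>
    simp only [List.nil_append, List.foldl_cons, List.foldl_nil, pvFields, List.any_cons,
      List.any_nil, Bool.or_false, pvScanStep]
    by_cases h1 : PySem.Chars.strip cur = pvN1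
    · rw [if_pos h1, h1]; simp [pvN1, pvN2, pvN3]
    · rw [if_neg h1]
      by_cases h2 : PySem.Chars.strip cur = pvN2
      · rw [if_pos h2, h2]; simp [pvN1, pvN2, pvN3]
      · rw [if_neg h2]
        by_cases h3 : PySem.Chars.strip cur = pvN3
        · rw [if_pos h3, h3]; simp [pvN1, pvN2, pvN3]
        · rw [if_neg h3]; simp [h1, h2, h3]
  | cons c rest ih =>
    by_cases hc : c = ','
    · subst hc
      simp only [List.cons_append, List.foldl_cons]
      rw [show pvScanStep ((f1, f2, f3), cur) ',' =
          ((if PySem.Chars.strip cur = pvN1 then (true, f2, f3)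
            else if PySem.Chars.strip cur = pvN2 then (f1, true, f3)
            else if PySem.Chars.strip cur = pvN3 then (f1, f2, true)
            else (f1, f2, f3)), []) from by simp [pvScanStep]]
      rw [show pvFields cur (',' :: rest) = cur :: pvFields [] rest from by simp [pvFields]]
      simp only [List.any_cons]
      by_cases h1 : PySem.Chars.strip cur = pvN1
      · rw [if_pos h1, ih]
        have e1 : decide (PySem.Chars.strip cur = pvN1) = true := by rw [h1]; decide
        have e2 : decide (PySem.Chars.strip cur = pvN2) = false := by rw [h1]; decide
        have e3 : decide (PySem.Chars.strip cur = pvN3) = false := by rw [h1]; decide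
        simp [e1, e2, e3]
      · rw [if_neg h1]
        by_cases h2 : PySem.Chars.strip cur = pvN2
        · rw [if_pos h2, ih]
          have e1 : decide (PySem.Chars.strip cur = pvN1) = false := by rw [h2]; decide
          have e2 : decide (PySem.Chars.strip cur = pvN2) = true := by rw [h2]; decide
          have e3 : decide (PySem.Chars.strip cur = pvN3) = false := by rw [h2]; decide
          simp [e1, e2, e3]
        · rw [if_neg h2]
          by_cases h3 : PySem.Chars.strip cur = pvN3
          · rw [if_pos h3, ih]
            have e1 : decide (PySem.Chars.strip cur = pvN1) = false := by rw [h3]; decide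
            have e2 : decide (PySem.Chars.strip cur = pvN2) = false := by rw [h3]; decide
            have e3 : decide (PySem.Chars.strip cur = pvN3) = true := by rw [h3]; decide
            simp [e1, e2, e3]
          · rw [if_neg h3, ih]; simp [h1, h2, h3]
    · simp only [List.cons_append, List.foldl_cons]
      rw [show pvScanStep ((f1, f2, f3), cur) c = ((f1, f2, f3), cur ++ [c]) from by
        simp [pvScanStep, hc]]
      rw [ih]
      simp [pvFields, hc]

-- A's set membership for a nonempty target m (with chars t) = a scan of the fields of cs
theorem contains_problems (cs : List Char) (m : String) (t : List Char)
    (ht : m.toList = t) (hm : t ≠ []) :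
    PySem.Set.contains
      (PySem.Set.ofList
        ((((PySem.Chars.splitOn cs [',']).map String.ofList).filter
            (fun p => !(PySem.Str.strip p == ""))).map PySem.Str.strip)) m
    = (pvFields [] cs).any (fun p => PySem.Chars.strip p = t) := by
  rw [← splitOn_comma, Bool.eq_iff_iff]
  simp only [pysem, PySem.Set.contains, List.contains_iff_mem, List.mem_map, List.mem_filter,
    List.any_eq_true, decide_eq_true_eq, Bool.not_eq_eq_eq_not, Bool.not_true]
  constructor
  · rintro ⟨p, ⟨⟨q, hq, rfl⟩, -⟩, hpm⟩
    refine ⟨q, hq, ?_⟩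
    have := congrArg String.toList hpm
    simpa [PySem.Str.strip, ht] using this
  · rintro ⟨q, hq, hqm⟩
    refine ⟨String.ofList q, ⟨⟨q, hq, rfl⟩, ?_⟩, ?_⟩
    · have hs : PySem.Str.strip (String.ofList q) = String.ofList t := by
        simp [PySem.Str.strip, hqm]
      rw [hs, beq_eq_false_iff_ne]
      intro h'
      exact hm (by simpa using congrArg String.toList h')
    · apply String.toList_inj.mp
      simpa [PySem.Str.strip, ht] using hqm

-- ===== VERDICT (by name: the statement is the Claim_ definition above) =====
theorem collect_problem_flags_py_spec : Claim_equal_collect_problem_flags_py := by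
  intro problem_text _hdom
  unfold Spec_collect_problem_flags_py collect_problem_flags_py collect_problem_flags_py_alt csv_text_py
  dsimp only
  rw [show (PySem.Str.split? (PySem.Str.strip (problem_text.getD "")) ",").getD [] =
      (PySem.Chars.splitOn (PySem.Str.strip (problem_text.getD "")).toList [',']).map String.ofList from by
    simp [PySem.Str.split?, PySem.Chars.split?]]
  rw [foldl_pvScanStep]
  rw [contains_problems _ "missing_batch_no" pvN1 rfl (by decide),
      contains_problems _ "missing_production_date" pvN2 rfl (by decide),
      contains_problems _ "missing_expiry_date" pvN3 rfl (by decide)]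
  cases (pvFields [] (PySem.Str.strip (problem_text.getD "")).toList).any
      (fun p => PySem.Chars.strip p = pvN1) <;>
    cases (pvFields [] (PySem.Str.strip (problem_text.getD "")).toList).any
        (fun p => PySem.Chars.strip p = pvN2) <;>
      cases (pvFields [] (PySem.Str.strip (problem_text.getD "")).toList).any
          (fun p => PySem.Chars.strip p = pvN3) <;>
        simp [PySem.Dict.insert]
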